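-- pv_equiv track=rewrite | github.com/ha4219/algorithm | boj/boj_21314.py | fmax
-- ===== SOURCE A (Python) =====
-- def fmax(s):
--     sl = len(s)
--     m = 0
--     k = 0
--     for i in range(sl):
--         if s[i]=='M':
--             m+=1
--         else:
--             k+=1
--             break
--     if k==0:
--         return '1'*m
--     return '5'+'0'*m+fmax(s[i+1:])
-- ===== SOURCE B (Python) =====
-- def fmax(s):
--     parts = []
--     cur = 0
--     for ch in s:
--         if ch == 'M':
--             cur += 1
--         else:
--             parts.append('5' + '0' * cur)
--             cur = 0
--     parts.append('1' * cur)
--     return ''.join(parts)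
-- ===== Notes on version B (the rewrite author's own statement) =====
-- stated objective: faster
-- what changed: Replaces the recursive scan-then-slice (which copies and rescans the remaining string at every delimiter) with a single iterative left-to-right pass that accumulates run lengths and emits pieces as it goes.
import Mathlib
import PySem

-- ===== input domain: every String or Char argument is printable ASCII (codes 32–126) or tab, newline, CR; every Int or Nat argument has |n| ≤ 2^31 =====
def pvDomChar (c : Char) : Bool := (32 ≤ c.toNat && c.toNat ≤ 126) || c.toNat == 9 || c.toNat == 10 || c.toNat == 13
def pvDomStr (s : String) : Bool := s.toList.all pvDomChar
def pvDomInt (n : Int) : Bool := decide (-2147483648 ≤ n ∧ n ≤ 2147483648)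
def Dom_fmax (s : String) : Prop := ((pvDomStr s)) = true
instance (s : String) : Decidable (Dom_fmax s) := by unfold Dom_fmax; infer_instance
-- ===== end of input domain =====

-- B replaces A's recursive scan-then-slice with one iterative pass accumulating run lengths (simpler).

-- ===== PORT A =====
-- A's for-loop with break: scans the list counting m (leading 'M's) and sets k=1 at the
-- first non-'M', recording its index i; returns (m, k, i).  (When no break occurs, Python
-- never uses i, so the returned index is irrelevant and we return 0.)
def fmaxLoopA : List Char → Nat → Nat → Nat → Nat × Nat × Nat
  | [], _i, m, k => (m, k, 0)
  | c :: rest, i, m, k => if c == 'M' then fmaxLoopA rest (i + 1) (m + 1) k else (m, k + 1, i)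

theorem fmaxLoopA_break_lt (cs : List Char) (i m k : Nat)
    (h : (fmaxLoopA cs i m k).2.1 ≠ k) : (fmaxLoopA cs i m k).2.2 - i < cs.length := by
  induction cs generalizing i m k with
  | nil => simp [fmaxLoopA] at h
  | cons c rest ih =>
    by_cases hc : c == 'M'
    · have := ih (i + 1) (m + 1) k (by simpa [fmaxLoopA, hc] using h)
      simp only [fmaxLoopA, hc, if_pos, List.length_cons]
      omega
    · simp [fmaxLoopA, hc]

def fmaxA (cs : List Char) : List Char :=
  let t := fmaxLoopA cs 0 0 0
  if _h : t.2.1 = 0 then List.replicate t.1 '1'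
  else '5' :: List.replicate t.1 '0' ++ fmaxA (cs.drop (t.2.2 + 1))
termination_by cs.length
decreasing_by
  have := fmaxLoopA_break_lt cs 0 0 0 _h
  simp only [List.length_drop]
  omega

def fmax (s : String) : String := String.ofList (fmaxA s.toList)

-- ===== PORT B =====
-- B's single loop: cur counts the current 'M'-run; on a delimiter emit '5'+'0'*cur, and at
-- the end emit '1'*cur (parts are accumulated already-joined in acc).
def fmaxLoopB : List Char → List Char → Nat → List Char
  | [], acc, cur => acc ++ List.replicate cur '1'
  | c :: rest, acc, cur =>
    if c == 'M' then fmaxLoopB rest acc (cur + 1)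
    else fmaxLoopB rest (acc ++ '5' :: List.replicate cur '0') 0

def fmax_alt (s : String) : String := String.ofList (fmaxLoopB s.toList [] 0)

-- ===== PRECONDITION & SPEC =====
def Spec_fmax (s : String) (out : String) : Prop := out = fmax_alt s
instance (s : String) (out : String) : Decidable (Spec_fmax s out) := by unfold Spec_fmax; infer_instance

-- ===== CLAIM (what is proved, stated in full; the proofs are below) =====
def Claim_equal_fmax : Prop := ∀ (s : String), Dom_fmax s → Spec_fmax s (fmax s)

-- ===== LEMMAS AND PROOFS =====

theorem fmaxLoopA_replicate (n : Nat) (rest : List Char) (i m k : Nat) :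
    fmaxLoopA (List.replicate n 'M' ++ rest) i m k = fmaxLoopA rest (i + n) (m + n) k := by
  induction n generalizing i m with
  | zero => simp
  | succ j ih =>
    simp only [List.replicate_succ, List.cons_append, fmaxLoopA, beq_self_eq_true, if_pos]
    rw [ih]
    ring_nf

theorem fmaxA_replicate_cons (cur : Nat) (c : Char) (rest : List Char) (hc : ¬ c == 'M') :
    fmaxA (List.replicate cur 'M' ++ c :: rest) =
      '5' :: List.replicate cur '0' ++ fmaxA rest := by
  rw [fmaxA]
  have hl : fmaxLoopA (List.replicate cur 'M' ++ c :: rest) 0 0 0 = (cur, 1, cur) := by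
    rw [fmaxLoopA_replicate]
    simp [fmaxLoopA, hc]
  simp only [hl]
  have hd : (List.replicate cur 'M' ++ c :: rest).drop (cur + 1) = rest := by
    rw [show cur + 1 = (List.replicate cur 'M').length + 1 from by simp]
    simp [List.drop_append]
  simp [hd]

theorem fmaxA_replicate (cur : Nat) :
    fmaxA (List.replicate cur 'M') = List.replicate cur '1' := by
  rw [fmaxA]
  have hl : fmaxLoopA (List.replicate cur 'M') 0 0 0 = (cur, 0, 0) := by
    rw [show (List.replicate cur 'M') = List.replicate cur 'M' ++ [] by simp,
        fmaxLoopA_replicate]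
    simp [fmaxLoopA]
  simp [hl]

theorem loopB_eq_fmaxA (cs : List Char) (acc : List Char) (cur : Nat) :
    fmaxLoopB cs acc cur = acc ++ fmaxA (List.replicate cur 'M' ++ cs) := by
  induction cs generalizing acc cur with
  | nil =>
    simp [fmaxLoopB, fmaxA_replicate]
  | cons c rest ih =>
    by_cases hc : c == 'M'
    · have hcM : c = 'M' := by simpa using hc
      simp only [fmaxLoopB, hc, if_pos, ih]
      congr 1
      rw [hcM, show List.replicate cur 'M' ++ 'M' :: rest
            = List.replicate (cur + 1) 'M' ++ rest by
          rw [List.replicate_succ']; simp]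
    · simp only [fmaxLoopB, hc, ih]
      rw [fmaxA_replicate_cons cur c rest hc]
      simp

-- ===== VERDICT (by name: the statement is the Claim_ definition above) =====
theorem fmax_spec : Claim_equal_fmax := by
  intro s _
  unfold Spec_fmax fmax fmax_alt
  rw [loopB_eq_fmaxA]
  simp
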